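-- pv_equiv track=rewrite | github.com/unmtransinfo/SmartsFilter-API | test.py | _strip_single_letter_parens
-- ===== SOURCE A (Python) =====
-- def _strip_single_letter_parens(smarts: str) -> str:
--     """Strip single-letter parens like (H) or (C), but NOT inside $() recursive SMARTS."""
--     result = []
--     i = 0
--     dollar_depth = 0  # track depth inside $(...)
--     while i < len(smarts):
--         if smarts[i:i+2] == '$(':
--             dollar_depth += 1
--             result.append('$(')
--             i += 2
--             continue
--         if dollar_depth > 0:
--             if smarts[i] == '(':
--                 dollar_depth += 1
--             elif smarts[i] == ')':
--                 dollar_depth -= 1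
--             result.append(smarts[i])
--             i += 1
--             continue
--         # Outside $(): apply the (X) → X rule
--         if (smarts[i] == '(' and i + 2 < len(smarts)
--                 and smarts[i+2] == ')' and smarts[i+1].isalpha()):
--             result.append(smarts[i+1])
--             i += 3
--         else:
--             result.append(smarts[i])
--             i += 1
--     return ''.join(result)
-- ===== SOURCE B (Python) =====
-- def _tokenize(smarts):
--     """Split into (protected, chunk) pieces: protected chunks are $(...) recursive
--     SMARTS regions (depth-counted, '$(' adds a level), unprotected is the rest."""
--     chunks = []
--     n = len(smarts)
--     i = 0
--     while i < n:
--         if smarts.startswith('$(', i):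
--             j = i + 2
--             depth = 1
--             while j < n and depth > 0:
--                 if smarts.startswith('$(', j):
--                     depth += 1
--                     j += 2
--                 elif smarts[j] == '(':
--                     depth += 1
--                     j += 1
--                 elif smarts[j] == ')':
--                     depth -= 1
--                     j += 1
--                 else:
--                     j += 1
--             chunks.append((True, smarts[i:j]))
--             i = j
--         else:
--             j = i
--             while j < n and not smarts.startswith('$(', j):
--                 j += 1
--             chunks.append((False, smarts[i:j]))
--             i = j
--     return chunks
--
--
-- def _sub_single_letter(t):
--     """Replace every '(X)' with 'X' when X is a single alphabetic character."""
--     out = []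
--     k = 0
--     n = len(t)
--     while k < n:
--         if t[k] == '(' and k + 2 < n and t[k + 2] == ')' and t[k + 1].isalpha():
--             out.append(t[k + 1])
--             k += 3
--         else:
--             out.append(t[k])
--             k += 1
--     return ''.join(out)
--
--
-- def _strip_single_letter_parens(smarts: str) -> str:
--     return ''.join(t if protected else _sub_single_letter(t)
--                    for protected, t in _tokenize(smarts))
-- ===== Notes on version B (the rewrite author's own statement) =====
-- stated objective: alternative
-- what changed: A's single index-walking state machine (one cursor, a dollar_depth flag deciding per character) is replaced by a two-phase decomposition: first tokenise the string into protected $(...) chunks and unprotected chunks, then emit protected chunks verbatim and run a separate (X)->X substitution pass over each unprotected chunk.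
import Mathlib
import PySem

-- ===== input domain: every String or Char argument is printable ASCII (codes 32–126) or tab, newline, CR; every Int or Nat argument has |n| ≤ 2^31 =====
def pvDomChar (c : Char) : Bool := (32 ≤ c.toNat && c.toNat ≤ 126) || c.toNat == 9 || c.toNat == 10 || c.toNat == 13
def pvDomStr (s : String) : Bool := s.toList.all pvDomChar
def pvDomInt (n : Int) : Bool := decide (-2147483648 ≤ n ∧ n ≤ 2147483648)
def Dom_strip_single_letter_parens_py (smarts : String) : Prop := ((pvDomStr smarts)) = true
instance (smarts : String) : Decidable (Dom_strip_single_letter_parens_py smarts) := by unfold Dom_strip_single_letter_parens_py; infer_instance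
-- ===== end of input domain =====

-- B replaces A's single index-walking state machine by a two-phase tokenise-then-substitute
-- decomposition (alternative structure, same linear cost); return values proved equal on all inputs.
-- The fuel parameters are totality guards only: every call supplies fuel ≥ list length, so the
-- fuel-exhausted arms are never reached.

-- ===== PORT A =====
-- A's while loop: one cursor over the chars, dollar_depth : Int; each arm mirrors one Python branch.
def pvLoopA (fuel : Nat) (s : List Char) (d : Int) : List Char :=
  match fuel, s with
  | _, [] => []
  | 0, _ => []   -- fuel guard, unreachable for fuel ≥ s.length
  | fuel + 1, c1 :: rest1 =>
    -- smarts[i:i+2] == '$('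
    if c1 = '$' ∧ rest1.head? = some '(' then
      '$' :: '(' :: pvLoopA fuel rest1.tail (d + 1)
    else if 0 < d then
      c1 :: pvLoopA fuel rest1 (if c1 = '(' then d + 1 else if c1 = ')' then d - 1 else d)
    else
      -- smarts[i] == '(' and i+2 < len(smarts) and smarts[i+2] == ')' and smarts[i+1].isalpha()
      match rest1 with
      | c2 :: c3 :: rest3 =>
        if c1 = '(' ∧ c3 = ')' ∧ PySem.Chars.isalpha c2 then c2 :: pvLoopA fuel rest3 d
        else c1 :: pvLoopA fuel (c2 :: c3 :: rest3) d
      | [] => c1 :: pvLoopA fuel [] d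
      | [c2] => c1 :: pvLoopA fuel [c2] d

def strip_single_letter_parens_py (smarts : String) : String :=
  String.ofList (pvLoopA smarts.toList.length smarts.toList 0)

-- ===== PORT B =====
-- Source B _tokenize, inner while of the protected branch: consume until depth returns to 0.
def pvTakeProt (fuel : Nat) (s : List Char) (d : Int) : List Char × List Char :=
  if 0 < d then
    match fuel, s with
    | _, [] => ([], [])
    | 0, _ => ([], s)   -- fuel guard, unreachable for fuel ≥ s.length
    | fuel + 1, c :: r =>
      if c = '$' ∧ r.head? = some '(' then
        let p := pvTakeProt fuel r.tail (d + 1); ('$' :: '(' :: p.1, p.2)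
      else
        let p := pvTakeProt fuel r (if c = '(' then d + 1 else if c = ')' then d - 1 else d)
        (c :: p.1, p.2)
  else ([], s)

-- Source B _tokenize, inner while of the unprotected branch: consume until '$(' (or end).
def pvTakeUnprot (s : List Char) : List Char × List Char :=
  match s with
  | [] => ([], [])
  | c :: r =>
    if c = '$' ∧ r.head? = some '(' then ([], s)
    else let p := pvTakeUnprot r; (c :: p.1, p.2)

-- Source B _sub_single_letter: the (X) → X substitution pass over an unprotected chunk.
def pvSubB (fuel : Nat) (t : List Char) : List Char :=
  match fuel, t with
  | _, [] => []
  | 0, _ => []   -- fuel guard, unreachable for fuel ≥ t.length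
  | fuel + 1, c :: r =>
    match r with
    | c2 :: c3 :: r3 =>
      if c = '(' ∧ c3 = ')' ∧ PySem.Chars.isalpha c2 then c2 :: pvSubB fuel r3
      else c :: pvSubB fuel (c2 :: c3 :: r3)
    | [] => c :: pvSubB fuel []
    | [c2] => c :: pvSubB fuel [c2]

-- Source B _tokenize, outer loop: alternating protected / unprotected chunks.
def pvTokB (fuel : Nat) (s : List Char) : List (Bool × List Char) :=
  match fuel, s with
  | _, [] => []
  | 0, _ => []   -- fuel guard, unreachable for fuel ≥ s.length
  | fuel + 1, c :: r =>
    if c = '$' ∧ r.head? = some '(' then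
      let p := pvTakeProt r.tail.length r.tail 1
      (true, '$' :: '(' :: p.1) :: pvTokB fuel p.2
    else
      let p := pvTakeUnprot r
      (false, c :: p.1) :: pvTokB fuel p.2

-- Source B ''.join(t if protected else _sub_single_letter(t) for protected, t in chunks)
def pvJoinB (ts : List (Bool × List Char)) : List Char :=
  ts.foldr (fun pt acc => (if pt.1 then pt.2 else pvSubB pt.2.length pt.2) ++ acc) []

def strip_single_letter_parens_py_alt (smarts : String) : String :=
  String.ofList (pvJoinB (pvTokB smarts.toList.length smarts.toList))

-- ===== PRECONDITION & SPEC =====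
def Spec_strip_single_letter_parens_py (smarts : String) (out : String) : Prop := out = strip_single_letter_parens_py_alt smarts
instance (smarts : String) (out : String) : Decidable (Spec_strip_single_letter_parens_py smarts out) := by unfold Spec_strip_single_letter_parens_py; infer_instance

-- ===== CLAIM (what is proved, stated in full; the proofs are below) =====
def Claim_equal_strip_single_letter_parens_py : Prop := ∀ (smarts : String), Dom_strip_single_letter_parens_py smarts → Spec_strip_single_letter_parens_py smarts (strip_single_letter_parens_py smarts)

-- ===== LEMMAS AND PROOFS =====

-- one-step unfolding lemmas for the fuel-guarded definitions
theorem pvLoopA_nil (f : Nat) (d : Int) : pvLoopA f [] d = [] := by cases f <;> rfl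

theorem pvLoopA_dollar (f : Nat) (c : Char) (r : List Char) (d : Int)
    (hds : c = '$' ∧ r.head? = some '(') :
    pvLoopA (f + 1) (c :: r) d = '$' :: '(' :: pvLoopA f r.tail (d + 1) := by
  rw [pvLoopA.eq_def]; simp [hds]

theorem pvLoopA_depth (f : Nat) (c : Char) (r : List Char) (d : Int)
    (hds : ¬(c = '$' ∧ r.head? = some '(')) (hd : 0 < d) :
    pvLoopA (f + 1) (c :: r) d =
      c :: pvLoopA f r (if c = '(' then d + 1 else if c = ')' then d - 1 else d) := by
  rw [pvLoopA.eq_def]; simp only [if_neg hds, if_pos hd]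

theorem pvLoopA_zero_nil (f : Nat) (c : Char) (d : Int)
    (hds : ¬(c = '$' ∧ ([] : List Char).head? = some '(')) (hd : ¬ 0 < d) :
    pvLoopA (f + 1) [c] d = c :: pvLoopA f [] d := by
  rw [pvLoopA.eq_def]; simp only [if_neg hds, if_neg hd]

theorem pvLoopA_zero_one (f : Nat) (c c2 : Char) (d : Int)
    (hds : ¬(c = '$' ∧ ([c2] : List Char).head? = some '(')) (hd : ¬ 0 < d) :
    pvLoopA (f + 1) [c, c2] d = c :: pvLoopA f [c2] d := by
  rw [pvLoopA.eq_def]; simp only [if_neg hds, if_neg hd]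

theorem pvLoopA_zero_long (f : Nat) (c c2 c3 : Char) (r3 : List Char) (d : Int)
    (hds : ¬(c = '$' ∧ (c2 :: c3 :: r3).head? = some '(')) (hd : ¬ 0 < d) :
    pvLoopA (f + 1) (c :: c2 :: c3 :: r3) d =
      if c = '(' ∧ c3 = ')' ∧ PySem.Chars.isalpha c2 then c2 :: pvLoopA f r3 d
      else c :: pvLoopA f (c2 :: c3 :: r3) d := by
  rw [pvLoopA.eq_def]; simp only [if_neg hds, if_neg hd]

theorem pvTakeProt_zero (f : Nat) (s : List Char) (d : Int) (hd : ¬ 0 < d) :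
    pvTakeProt f s d = ([], s) := by
  rw [pvTakeProt.eq_def]; simp only [if_neg hd]

theorem pvTakeProt_nil (f : Nat) (d : Int) (hd : 0 < d) :
    pvTakeProt f [] d = ([], []) := by
  rw [pvTakeProt.eq_def]; simp only [if_pos hd]

theorem pvTakeProt_dollar (f : Nat) (c : Char) (r : List Char) (d : Int) (hd : 0 < d)
    (hds : c = '$' ∧ r.head? = some '(') :
    pvTakeProt (f + 1) (c :: r) d =
      ('$' :: '(' :: (pvTakeProt f r.tail (d + 1)).1, (pvTakeProt f r.tail (d + 1)).2) := by
  rw [pvTakeProt.eq_def]; simp only [if_pos hd]; simp [hds]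

theorem pvTakeProt_step (f : Nat) (c : Char) (r : List Char) (d : Int) (hd : 0 < d)
    (hds : ¬(c = '$' ∧ r.head? = some '(')) :
    pvTakeProt (f + 1) (c :: r) d =
      (c :: (pvTakeProt f r (if c = '(' then d + 1 else if c = ')' then d - 1 else d)).1,
        (pvTakeProt f r (if c = '(' then d + 1 else if c = ')' then d - 1 else d)).2) := by
  rw [pvTakeProt.eq_def]; simp only [if_pos hd]; simp [hds]

theorem pvSubB_nil (f : Nat) : pvSubB f [] = [] := by cases f <;> rfl

theorem pvSubB_one (f : Nat) (c : Char) : pvSubB (f + 1) [c] = c :: pvSubB f [] := rfl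

theorem pvSubB_two (f : Nat) (c c2 : Char) : pvSubB (f + 1) [c, c2] = c :: pvSubB f [c2] := rfl

theorem pvSubB_long (f : Nat) (c c2 c3 : Char) (r3 : List Char) :
    pvSubB (f + 1) (c :: c2 :: c3 :: r3) =
      if c = '(' ∧ c3 = ')' ∧ PySem.Chars.isalpha c2 then c2 :: pvSubB f r3
      else c :: pvSubB f (c2 :: c3 :: r3) := rfl

theorem pvTokB_nil (f : Nat) : pvTokB f [] = [] := by cases f <;> rfl

theorem pvTokB_dollar (f : Nat) (c : Char) (r : List Char)
    (hds : c = '$' ∧ r.head? = some '(') :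
    pvTokB (f + 1) (c :: r) =
      (true, '$' :: '(' :: (pvTakeProt r.tail.length r.tail 1).1) ::
        pvTokB f (pvTakeProt r.tail.length r.tail 1).2 := by
  rw [pvTokB.eq_def]; simp [hds]

theorem pvTokB_unprot (f : Nat) (c : Char) (r : List Char)
    (hds : ¬(c = '$' ∧ r.head? = some '(')) :
    pvTokB (f + 1) (c :: r) =
      (false, c :: (pvTakeUnprot r).1) :: pvTokB f (pvTakeUnprot r).2 := by
  rw [pvTokB.eq_def]; simp [hds]

-- fuel irrelevance: any fuel ≥ the list length computes the same value
theorem pvLoopA_congr : ∀ (f1 f2 : Nat) (s : List Char) (d : Int),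
    s.length ≤ f1 → s.length ≤ f2 → pvLoopA f1 s d = pvLoopA f2 s d := by
  intro f1
  induction f1 with
  | zero =>
    intro f2 s d h1 _
    have hs : s = [] := List.eq_nil_of_length_eq_zero (Nat.le_zero.mp h1)
    subst hs
    rw [pvLoopA_nil, pvLoopA_nil]
  | succ f ih =>
    intro f2 s d h1 h2
    rcases s with _ | ⟨c, r⟩
    · rw [pvLoopA_nil, pvLoopA_nil]
    · rcases f2 with _ | g
      · simp at h2
      · have hr : r.length ≤ f := by simp at h1; omega
        have hrg : r.length ≤ g := by simp at h2; omega
        by_cases hds : c = '$' ∧ r.head? = some '('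
        · rw [pvLoopA_dollar f c r d hds, pvLoopA_dollar g c r d hds,
            ih g r.tail (d + 1) (by simp [List.length_tail]; omega) (by simp [List.length_tail]; omega)]
        · by_cases hd : 0 < d
          · rw [pvLoopA_depth f c r d hds hd, pvLoopA_depth g c r d hds hd, ih g r _ hr hrg]
          · rcases r with _ | ⟨c2, rr⟩
            · rw [pvLoopA_zero_nil f c d hds hd, pvLoopA_zero_nil g c d hds hd,
                ih g [] d (by simp) (by simp)]
            · rcases rr with _ | ⟨c3, r3⟩
              · rw [pvLoopA_zero_one f c c2 d hds hd, pvLoopA_zero_one g c c2 d hds hd,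
                  ih g [c2] d (by simpa using hr) (by simpa using hrg)]
              · rw [pvLoopA_zero_long f c c2 c3 r3 d hds hd,
                  pvLoopA_zero_long g c c2 c3 r3 d hds hd]
                by_cases hc : c = '(' ∧ c3 = ')' ∧ PySem.Chars.isalpha c2 = true
                · rw [if_pos hc, if_pos hc,
                    ih g r3 d (by simp at hr; omega) (by simp at hrg; omega)]
                · rw [if_neg hc, if_neg hc, ih g (c2 :: c3 :: r3) d hr hrg]

theorem pvSubB_congr : ∀ (f1 f2 : Nat) (t : List Char),
    t.length ≤ f1 → t.length ≤ f2 → pvSubB f1 t = pvSubB f2 t := by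
  intro f1
  induction f1 with
  | zero =>
    intro f2 t h1 _
    have ht : t = [] := List.eq_nil_of_length_eq_zero (Nat.le_zero.mp h1)
    subst ht
    rw [pvSubB_nil, pvSubB_nil]
  | succ f ih =>
    intro f2 t h1 h2
    rcases t with _ | ⟨c, r⟩
    · rw [pvSubB_nil, pvSubB_nil]
    · rcases f2 with _ | g
      · simp at h2
      · rcases r with _ | ⟨c2, rr⟩
        · rw [pvSubB_one, pvSubB_one, ih g [] (by simp) (by simp)]
        · rcases rr with _ | ⟨c3, r3⟩
          · rw [pvSubB_two, pvSubB_two, ih g [c2] (by simp at h1 ⊢; omega) (by simp at h2 ⊢; omega)]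
          · rw [pvSubB_long, pvSubB_long]
            by_cases hc : c = '(' ∧ c3 = ')' ∧ PySem.Chars.isalpha c2 = true
            · rw [if_pos hc, if_pos hc, ih g r3 (by simp at h1; omega) (by simp at h2; omega)]
            · rw [if_neg hc, if_neg hc,
                ih g (c2 :: c3 :: r3) (by simp at h1 ⊢; omega) (by simp at h2 ⊢; omega)]

-- the rest of a pvTakeProt split is no longer than the input
theorem pvTakeProt_len : ∀ (f : Nat) (s : List Char) (d : Int),
    (pvTakeProt f s d).2.length ≤ s.length := by
  intro f
  induction f with
  | zero =>
    intro s d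
    by_cases hd : 0 < d
    · rcases s with _ | ⟨c, r⟩
      · rw [pvTakeProt_nil 0 d hd]
      · rw [pvTakeProt.eq_def]; simp only [if_pos hd]; exact le_refl _
    · rw [pvTakeProt_zero 0 s d hd]
  | succ f ih =>
    intro s d
    by_cases hd : 0 < d
    · rcases s with _ | ⟨c, r⟩
      · rw [pvTakeProt_nil _ d hd]
      · by_cases hds : c = '$' ∧ r.head? = some '('
        · rw [pvTakeProt_dollar f c r d hd hds]
          have := ih r.tail (d + 1)
          have ht : r.tail.length ≤ r.length := by simp [List.length_tail]
          simp only [List.length_cons]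
          omega
        · rw [pvTakeProt_step f c r d hd hds]
          have := ih r (if c = '(' then d + 1 else if c = ')' then d - 1 else d)
          simp only [List.length_cons]
          omega
    · rw [pvTakeProt_zero _ s d hd]

theorem pvTakeUnprot_len (s : List Char) : (pvTakeUnprot s).2.length ≤ s.length := by
  induction s with
  | nil => simp [pvTakeUnprot]
  | cons c r ih =>
    by_cases hds : c = '$' ∧ r.head? = some '('
    · simp [pvTakeUnprot, hds]
    · simp only [pvTakeUnprot, if_neg hds, List.length_cons]
      omega

-- pvTakeUnprot splits its input: consumed prefix ++ rest = input.
theorem pvTakeUnprot_split (s : List Char) : (pvTakeUnprot s).1 ++ (pvTakeUnprot s).2 = s := by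
  induction s with
  | nil => simp [pvTakeUnprot]
  | cons c r ih =>
    by_cases hds : c = '$' ∧ r.head? = some '('
    · simp [pvTakeUnprot, hds]
    · simp only [pvTakeUnprot, if_neg hds, List.cons_append, List.cons.injEq, true_and]
      exact ih

-- While dollar_depth > 0, A copies exactly the chars pvTakeProt consumes, then continues at depth 0.
theorem pvL1 : ∀ (f : Nat) (s : List Char) (d : Int), s.length ≤ f → 0 < d →
    pvLoopA f s d =
      (pvTakeProt f s d).1 ++
        pvLoopA (pvTakeProt f s d).2.length (pvTakeProt f s d).2 0 := by
  intro f
  induction f with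
  | zero =>
    intro s d h1 hd
    have hs : s = [] := List.eq_nil_of_length_eq_zero (Nat.le_zero.mp h1)
    subst hs
    rw [pvLoopA_nil, pvTakeProt_nil 0 d hd]
    simp [pvLoopA_nil]
  | succ f ih =>
    intro s d h1 hd
    rcases s with _ | ⟨c, r⟩
    · rw [pvLoopA_nil, pvTakeProt_nil _ d hd]
      simp [pvLoopA_nil]
    · have hr : r.length ≤ f := by simp at h1; omega
      by_cases hds : c = '$' ∧ r.head? = some '('
      · rw [pvLoopA_dollar f c r d hds, pvTakeProt_dollar f c r d hd hds,
          ih r.tail (d + 1) (by simp [List.length_tail]; omega) (by omega)]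
        simp
      · by_cases hd' : 0 < (if c = '(' then d + 1 else if c = ')' then d - 1 else d)
        · rw [pvLoopA_depth f c r d hds hd, pvTakeProt_step f c r d hd hds, ih r _ hr hd']
          simp
        · have hz : (if c = '(' then d + 1 else if c = ')' then d - 1 else d) = 0 := by
            split_ifs at hd' ⊢ <;> omega
          rw [pvLoopA_depth f c r d hds hd, pvTakeProt_step f c r d hd hds, hz,
            pvTakeProt_zero f r 0 (by omega)]
          simp only []
          rw [pvLoopA_congr f r.length r 0 hr (le_refl _)]
          simp

-- At depth 0, A strips exactly the chunk pvTakeUnprot consumes (as pvSubB does), then continues.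
theorem pvL2 : ∀ (f : Nat) (s : List Char), s.length ≤ f →
    pvLoopA f s 0 =
      pvSubB (pvTakeUnprot s).1.length (pvTakeUnprot s).1 ++
        pvLoopA (pvTakeUnprot s).2.length (pvTakeUnprot s).2 0 := by
  intro f
  induction f with
  | zero =>
    intro s h1
    have hs : s = [] := List.eq_nil_of_length_eq_zero (Nat.le_zero.mp h1)
    subst hs
    simp [pvLoopA_nil, pvTakeUnprot, pvSubB_nil]
  | succ f ih =>
    intro s h1
    rcases s with _ | ⟨c, r⟩
    · simp [pvLoopA_nil, pvTakeUnprot, pvSubB_nil]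
    · have hr : r.length ≤ f := by simp at h1; omega
      have hzz : ¬((0 : Int) < 0) := by decide
      by_cases hds : c = '$' ∧ r.head? = some '('
      · simp only [pvTakeUnprot, if_pos hds]
        simp only [pvSubB_nil, List.length_nil, List.nil_append]
        exact pvLoopA_congr (f + 1) ((c :: r).length) (c :: r) 0 h1 (le_refl _)
      · by_cases hpat : ∃ c2 c3 r3, r = c2 :: c3 :: r3 ∧ c = '(' ∧ c3 = ')' ∧
            PySem.Chars.isalpha c2 = true
        · obtain ⟨c2, c3, r3, hrr, hc, hc3, ha⟩ := hpat
          subst hrr; subst hc; subst hc3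
          have h1' : ¬(c2 = '$' ∧ ((')' : Char) :: r3).head? = some '(') := by simp
          have h2' : ¬((')' : Char) = '$' ∧ r3.head? = some '(') := by simp
          have htu : pvTakeUnprot ('(' :: c2 :: ')' :: r3) =
              ('(' :: c2 :: ')' :: (pvTakeUnprot r3).1, (pvTakeUnprot r3).2) := by
            simp only [pvTakeUnprot, if_neg hds, if_neg h1', if_neg h2']
          have hloop : pvLoopA (f + 1) ('(' :: c2 :: ')' :: r3) 0 = c2 :: pvLoopA f r3 0 := by
            rw [pvLoopA_zero_long f '(' c2 ')' r3 0 hds hzz]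
            simp [ha]
          have hr3 : r3.length ≤ f := by simp at h1; omega
          have hsub : pvSubB ('(' :: c2 :: ')' :: (pvTakeUnprot r3).1).length
              ('(' :: c2 :: ')' :: (pvTakeUnprot r3).1) =
              c2 :: pvSubB (pvTakeUnprot r3).1.length (pvTakeUnprot r3).1 := by
            simp only [List.length_cons]
            rw [pvSubB_long, if_pos ⟨rfl, rfl, ha⟩,
              pvSubB_congr ((pvTakeUnprot r3).1.length + 1 + 1) (pvTakeUnprot r3).1.length
                (pvTakeUnprot r3).1 (by omega) (le_refl _)]
          rw [hloop, htu, hsub, ih r3 hr3]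
          simp
        · -- no strip at this position: A copies one char, as does the chunk collector
          have hloop : pvLoopA (f + 1) (c :: r) 0 = c :: pvLoopA f r 0 := by
            rcases r with _ | ⟨c2, rr⟩
            · rw [pvLoopA_zero_nil f c 0 hds hzz]
            · rcases rr with _ | ⟨c3, r3⟩
              · rw [pvLoopA_zero_one f c c2 0 hds hzz]
              · have hcond : ¬(c = '(' ∧ c3 = ')' ∧ PySem.Chars.isalpha c2 = true) := by
                  intro hcc
                  exact hpat ⟨c2, c3, r3, rfl, hcc.1, hcc.2.1, hcc.2.2⟩
                rw [pvLoopA_zero_long f c c2 c3 r3 0 hds hzz, if_neg hcond]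
          have htu : pvTakeUnprot (c :: r) = (c :: (pvTakeUnprot r).1, (pvTakeUnprot r).2) := by
            simp only [pvTakeUnprot, if_neg hds]
          have hsub : pvSubB (c :: (pvTakeUnprot r).1).length (c :: (pvTakeUnprot r).1) =
              c :: pvSubB (pvTakeUnprot r).1.length (pvTakeUnprot r).1 := by
            rcases hu : (pvTakeUnprot r).1 with _ | ⟨x, _ | ⟨y, w⟩⟩
            · rfl
            · rfl
            · have hsplit := pvTakeUnprot_split r
              rw [hu] at hsplit
              have hrr : r = x :: y :: (w ++ (pvTakeUnprot r).2) := by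
                simpa using hsplit.symm
              have hcond : ¬(c = '(' ∧ y = ')' ∧ PySem.Chars.isalpha x = true) := by
                intro hcc
                exact hpat ⟨x, y, w ++ (pvTakeUnprot r).2, hrr, hcc.1, hcc.2.1, hcc.2.2⟩
              simp only [List.length_cons]
              rw [pvSubB_long, if_neg hcond]
          rw [hloop, htu, hsub, ih r hr]
          simp

theorem pvMain : ∀ (f : Nat) (s : List Char), s.length ≤ f →
    pvLoopA f s 0 = pvJoinB (pvTokB f s) := by
  intro f
  induction f with
  | zero =>
    intro s h1
    have hs : s = [] := List.eq_nil_of_length_eq_zero (Nat.le_zero.mp h1)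
    subst hs
    rw [pvLoopA_nil, pvTokB_nil]
    rfl
  | succ f ih =>
    intro s h1
    rcases s with _ | ⟨c, r⟩
    · rw [pvLoopA_nil, pvTokB_nil]
      rfl
    · have hr : r.length ≤ f := by simp at h1; omega
      have ht : r.tail.length ≤ r.length := by simp [List.length_tail]
      by_cases hds : c = '$' ∧ r.head? = some '('
      · have hL1 := pvL1 r.tail.length r.tail 1 (le_refl _) (by omega)
        have hp := pvTakeProt_len r.tail.length r.tail 1
        have hcon := pvLoopA_congr f r.tail.length r.tail 1 (by omega) (le_refl _)
        have hrec := ih (pvTakeProt r.tail.length r.tail 1).2 (by omega)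
        rw [pvLoopA_dollar f c r 0 hds, pvTokB_dollar f c r hds]
        simp only [zero_add]
        rw [hcon, hL1]
        have hcon2 := pvLoopA_congr (pvTakeProt r.tail.length r.tail 1).2.length f
          (pvTakeProt r.tail.length r.tail 1).2 0 (le_refl _) (by omega)
        rw [hcon2, hrec]
        simp [pvJoinB]
      · have hL2 := pvL2 (f + 1) (c :: r) h1
        have htu : pvTakeUnprot (c :: r) = (c :: (pvTakeUnprot r).1, (pvTakeUnprot r).2) := by
          simp only [pvTakeUnprot, if_neg hds]
        have hu := pvTakeUnprot_len r
        have hrec := ih (pvTakeUnprot r).2 (by omega)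
        rw [hL2, htu, pvTokB_unprot f c r hds]
        have hcon := pvLoopA_congr (pvTakeUnprot r).2.length f (pvTakeUnprot r).2 0
          (le_refl _) (by omega)
        rw [hcon, hrec]
        simp [pvJoinB]

-- ===== VERDICT (by name: the statement is the Claim_ definition above) =====
theorem strip_single_letter_parens_py_spec : Claim_equal_strip_single_letter_parens_py := by
  intro smarts _
  unfold Spec_strip_single_letter_parens_py strip_single_letter_parens_py strip_single_letter_parens_py_alt
  rw [pvMain smarts.toList.length smarts.toList (le_refl _)]
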